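-- pv_equiv track=rewrite | github.com/keedjk7/Data-Structure | Lab10 Searching/63010139_lab10_5.py | candice
-- ===== SOURCE A (Python) =====
-- def candice(goods, weight, box):
--     goodsitr = 0
--     for i in range(box):
--         weightinbox = 0
--         while True:
--             if goodsitr == len(goods):
--                 return True
--             if weight >= goods[goodsitr] + weightinbox:
--                 weightinbox = weightinbox + goods[goodsitr]
--                 goodsitr+=1
--             else:
--                 break
--     return False
-- ===== SOURCE B (Python) =====
-- def candice(goods, weight, box):
--     # Single flat pass with (boxes_used, current fill) instead of A's nested
--     # box-outer/while-inner index loop.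
--     used = 1
--     cur = 0
--     for g in goods:
--         if cur + g <= weight:
--             cur += g
--         elif g <= weight:
--             used += 1
--             cur = g
--         else:
--             return False
--     return used <= box
-- ===== Notes on version B (the rewrite author's own statement) =====
-- stated objective: simpler
-- what changed: Replaced the nested box-counting outer loop with inner while over a goods index by one flat pass over goods that maintains (boxes_used, current fill) and compares boxes_used to box at the end.
import Mathlib
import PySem

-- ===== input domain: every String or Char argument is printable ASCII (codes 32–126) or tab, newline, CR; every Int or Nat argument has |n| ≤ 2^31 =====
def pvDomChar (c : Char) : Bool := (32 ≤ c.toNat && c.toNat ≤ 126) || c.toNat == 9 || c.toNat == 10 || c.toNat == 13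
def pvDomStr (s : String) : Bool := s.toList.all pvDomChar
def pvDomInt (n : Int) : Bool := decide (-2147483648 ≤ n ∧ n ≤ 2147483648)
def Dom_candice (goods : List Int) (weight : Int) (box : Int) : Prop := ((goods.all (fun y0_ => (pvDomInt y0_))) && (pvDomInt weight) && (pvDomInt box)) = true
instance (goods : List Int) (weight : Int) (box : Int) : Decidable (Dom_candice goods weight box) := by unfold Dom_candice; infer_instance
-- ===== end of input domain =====

-- B is the same greedy packing written as ONE flat pass over goods (simpler decomposition).

-- ===== PORT A =====
-- inner `while True` loop: returns none when goodsitr reached len(goods) (Python: return True),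
-- some goodsitr on break. goodsitr never exceeds len(goods) in A, so the ≥ guard is exact;
-- goods.getD goodsitr 0 is goods[goodsitr], always in range here.
def candiceInner (goods : List Int) (weight : Int) (goodsitr : Nat) (weightinbox : Int) : Option Nat :=
  if goods.length ≤ goodsitr then none
  else if weight ≥ goods.getD goodsitr 0 + weightinbox then
    candiceInner goods weight (goodsitr + 1) (weightinbox + goods.getD goodsitr 0)
  else some goodsitr
termination_by goods.length - goodsitr
decreasing_by omega

-- `for i in range(box)` : box.toNat iterations, carrying goodsitr
def candiceLoop (goods : List Int) (weight : Int) : Nat → Nat → Bool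
  | 0, _ => false
  | n + 1, goodsitr =>
    match candiceInner goods weight goodsitr 0 with
    | none => true
    | some goodsitr' => candiceLoop goods weight n goodsitr'

def candice (goods : List Int) (weight : Int) (box : Int) : Bool :=
  candiceLoop goods weight box.toNat 0

-- ===== PORT B =====
def candiceGo (weight : Int) (box : Int) : List Int → Int → Int → Bool
  | [], used, _ => decide (used ≤ box)
  | g :: rest, used, cur =>
    if cur + g ≤ weight then candiceGo weight box rest used (cur + g)
    else if g ≤ weight then candiceGo weight box rest (used + 1) g
    else false

def candice_alt (goods : List Int) (weight : Int) (box : Int) : Bool :=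
  candiceGo weight box goods 1 0

-- ===== PRECONDITION & SPEC =====
def Spec_candice (goods : List Int) (weight : Int) (box : Int) (out : Bool) : Prop := out = candice_alt goods weight box
instance (goods : List Int) (weight : Int) (box : Int) (out : Bool) : Decidable (Spec_candice goods weight box out) := by unfold Spec_candice; infer_instance

-- ===== CLAIM (what is proved, stated in full; the proofs are below) =====
def Claim_equal_candice : Prop := ∀ (goods : List Int) (weight : Int) (box : Int), Dom_candice goods weight box → Spec_candice goods weight box (candice goods weight box)

-- ===== LEMMAS AND PROOFS =====

-- B returns false as soon as boxes_used exceeds box (used only grows).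
theorem candiceGo_over (weight box : Int) :
    ∀ (l : List Int) (used cur : Int), box < used → candiceGo weight box l used cur = false := by
  intro l
  induction l with
  | nil => intro used cur h; simp [candiceGo]; omega
  | cons g rest ih =>
    intro used cur h
    simp only [candiceGo]
    split_ifs with h1 h2
    · exact ih used (cur + g) h
    · exact ih (used + 1) g (by omega)
    · rfl

-- A loops burning boxes without progress when stuck at an unpackable good.
theorem candiceLoop_stuck (goods : List Int) (weight : Int) :
    ∀ (f : Nat) (itr : Nat), itr < goods.length → weight < goods.getD itr 0 →
      candiceLoop goods weight f itr = false := by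
  intro f
  induction f with
  | zero => intro itr _ _; rfl
  | succ n ih =>
    intro itr hlt hw
    have hinner : candiceInner goods weight itr 0 = some itr := by
      rw [candiceInner]
      rw [if_neg (by omega)]
      rw [if_neg (by omega)]
    simp only [candiceLoop, hinner]
    exact ih itr hlt hw

-- Main invariant: A mid-box (fill wb, f spare boxes after the current one, position itr)
-- equals B at (goods.drop itr, used boxes so far, fill wb) when used + f = box.
theorem candice_run (goods : List Int) (weight box : Int) :
    ∀ (k itr : Nat) (wb used : Int) (f : Nat),
      goods.length - itr = k → itr ≤ goods.length → used + (f : Int) = box →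
      (match candiceInner goods weight itr wb with
       | none => true
       | some itr' => candiceLoop goods weight f itr')
      = candiceGo weight box (goods.drop itr) used wb := by
  intro k
  induction k with
  | zero =>
    intro itr wb used f hk hle hbox
    have hitr : itr = goods.length := by omega
    subst hitr
    rw [candiceInner]
    rw [if_pos (le_refl _)]
    simp [List.drop_length, candiceGo]
    omega
  | succ n ih =>
    intro itr wb used f hk hle hbox
    have hlt : itr < goods.length := by omega
    have hdrop : goods.drop itr = goods.getD itr 0 :: goods.drop (itr + 1) := by
      rw [List.getD, List.drop_eq_getElem_cons hlt]
      simp [List.getElem?_eq_getElem hlt]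
    set g := goods.getD itr 0 with hg
    rw [candiceInner]
    rw [if_neg (by omega)]
    by_cases hfit : weight ≥ g + wb
    · rw [if_pos hfit, hdrop]
      simp only [candiceGo]
      rw [if_pos (by omega)]
      have := ih (itr + 1) (wb + g) used f (by omega) (by omega) hbox
      exact this
    · rw [if_neg hfit, hdrop]
      simp only [candiceGo]
      rw [if_neg (by omega)]
      by_cases hgw : g ≤ weight
      · rw [if_pos hgw]
        -- A opens the next box (fuel f), starting with g
        cases f with
        | zero =>
          rw [candiceGo_over weight box _ (used + 1) g (by omega)]
          rfl
        | succ m =>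
          have hinner : candiceInner goods weight itr 0 = candiceInner goods weight (itr + 1) g := by
            rw [candiceInner]
            rw [if_neg (by omega)]
            rw [if_pos (by omega)]
            simp [hg]
          have := ih (itr + 1) g (used + 1) m (by omega) (by omega) (by push_cast at hbox ⊢; omega)
          simp only [candiceLoop, hinner]
          exact this
      · rw [if_neg hgw]
        exact candiceLoop_stuck goods weight f itr hlt (by omega)

-- ===== VERDICT (by name: the statement is the Claim_ definition above) =====
theorem candice_spec : Claim_equal_candice := by
  intro goods weight box _
  unfold Spec_candice candice candice_alt
  by_cases hbox : 1 ≤ box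
  · have hft : box.toNat = (box.toNat - 1) + 1 := by omega
    rw [hft]
    have := candice_run goods weight box goods.length 0 0 1 (box.toNat - 1)
      (by omega) (by omega) (by omega)
    simp only [List.drop_zero] at this
    simpa only [candiceLoop] using this
  · have hz : box.toNat = 0 := by omega
    rw [hz]
    rw [candiceGo_over weight box goods 1 0 (by omega)]
    rfl
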